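-- pv_equiv track=rewrite | github.com/cornell-zhang/heurigym | technology_mapping/program/io_utils.py | create_complete_truth_table
-- ===== SOURCE A (Python) =====
-- import itertools
--
-- def create_complete_truth_table(explicit_truth_table, num_inputs):
--     """
--     Create a complete truth table with all 2^num_inputs rows.
--
--     In BLIF format:
--     - For rows with output '1': Only these input patterns produce '1', all others produce '0'
--     - For rows with output '0': Only these input patterns produce '0', all others produce '1'
--
--     Args:
--         explicit_truth_table: List of (input_pattern, output) tuples from BLIF
--         num_inputs: Number of inputs to the logic gate
--
--     Returns:
--         List of (input_pattern, output) tuples representing the complete truth table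
--     """
--     # Generate all possible input combinations
--     all_input_patterns = [''.join(p) for p in itertools.product('01', repeat=num_inputs)]
--
--     # Check if we have any entries with output 0
--     has_output_0 = any(output == '0' for _, output in explicit_truth_table)
--     has_output_1 = any(output == '1' for _, output in explicit_truth_table)
--
--     # if has both, raise error
--     if has_output_0 and has_output_1:
--         raise ValueError("BLIF file has both output 0 and 1 entries within the same node")
--
--     # Determine the default output value (what to use for unlisted patterns)
--     if has_output_0:
--         # If only output '0' entries exist, default is '1'
--         default_output = '1'
--     else:
--         default_output = '0'
--
--     # Create a mapping of existing patterns to their outputs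
--     explicit_outputs = {}
--     for pattern, output in explicit_truth_table:
--         # Handle don't-care terms in the pattern
--         if '-' in pattern:
--             # Expand patterns with don't-cares into multiple patterns
--             concrete_patterns = expand_dont_care_pattern(pattern)
--             for concrete in concrete_patterns:
--                 explicit_outputs[concrete] = output
--         else:
--             explicit_outputs[pattern] = output
--
--     # Create the complete truth table
--     complete_table = []
--     for pattern in all_input_patterns:
--         # If this pattern is in the explicit table, use that output
--         # Otherwise, use the default output
--         output = explicit_outputs.get(pattern, default_output)
--         complete_table.append((pattern, output))
--
--     return complete_table
--
-- def expand_dont_care_pattern(pattern):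
--     """
--     Expand a pattern with don't-care terms into all concrete patterns.
--
--     Args:
--         pattern: Input pattern with possible '-' (don't-care) terms
--
--     Returns:
--         List of concrete patterns without don't-care terms
--     """
--     if '-' not in pattern:
--         return [pattern]
--
--     # Find the position of the first don't-care
--     pos = pattern.find('-')
--
--     # Replace it with both '0' and '1' and recursively expand
--     pattern_with_0 = pattern[:pos] + '0' + pattern[pos+1:]
--     pattern_with_1 = pattern[:pos] + '1' + pattern[pos+1:]
--
--     return expand_dont_care_pattern(pattern_with_0) + expand_dont_care_pattern(pattern_with_1)
-- ===== SOURCE B (Python) =====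
-- def create_complete_truth_table(explicit_truth_table, num_inputs):
--     """Complete truth table by direct wildcard scan: for each of the 2^n patterns
--     (generated recursively), scan the explicit entries newest-first and take the
--     first whose non-'-' positions all match; no expansion dict is built."""
--     has_output_0 = any(output == '0' for _, output in explicit_truth_table)
--     has_output_1 = any(output == '1' for _, output in explicit_truth_table)
--     if has_output_0 and has_output_1:
--         raise ValueError("BLIF file has both output 0 and 1 entries within the same node")
--     default_output = '1' if has_output_0 else '0'
--     entries = list(reversed(explicit_truth_table))
--
--     def output_for(pattern):
--         for entry_pattern, output in entries:
--             if len(entry_pattern) == len(pattern) and all(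
--                     e == '-' or e == c for e, c in zip(entry_pattern, pattern)):
--                 return output
--         return default_output
--
--     def rows(prefix, k):
--         if k == 0:
--             return [(prefix, output_for(prefix))]
--         return rows(prefix + '0', k - 1) + rows(prefix + '1', k - 1)
--
--     return rows('', num_inputs)
-- ===== Notes on version B (the rewrite author's own statement) =====
-- stated objective: alternative
-- what changed: B drops the don't-care-expansion dict (and the recursive expand helper) entirely: it generates the 2^n patterns by structural recursion on a prefix and, for each pattern, scans the explicit entries newest-first for one whose non-'-' positions match, falling back to the default output.
import Mathlib
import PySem

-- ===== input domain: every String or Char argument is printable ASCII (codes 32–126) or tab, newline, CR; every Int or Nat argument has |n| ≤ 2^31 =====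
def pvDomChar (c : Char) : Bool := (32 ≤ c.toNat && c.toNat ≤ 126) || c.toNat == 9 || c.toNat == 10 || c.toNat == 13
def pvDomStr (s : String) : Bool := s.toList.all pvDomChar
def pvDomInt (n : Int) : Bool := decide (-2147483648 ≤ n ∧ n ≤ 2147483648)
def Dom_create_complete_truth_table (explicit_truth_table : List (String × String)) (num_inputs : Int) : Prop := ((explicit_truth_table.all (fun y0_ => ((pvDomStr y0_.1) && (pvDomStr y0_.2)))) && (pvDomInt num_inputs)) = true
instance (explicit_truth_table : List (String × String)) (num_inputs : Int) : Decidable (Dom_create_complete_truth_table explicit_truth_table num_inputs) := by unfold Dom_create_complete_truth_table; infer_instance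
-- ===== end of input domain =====

-- B replaces A's don't-care-expansion dict by a direct newest-first wildcard scan per pattern
-- (alternative decomposition, no speed claim). Equivalence is proved on inputs where A returns
-- (no both-0-and-1 outputs, num_inputs ≥ 0).

-- ===== PORT A =====

-- itertools.product('01', repeat=n), each tuple joined: first character varies slowest.
def pvAllPatterns : Nat → List String
  | 0 => [""]
  | n + 1 => (pvAllPatterns n).map (fun s => "0" ++ s) ++ (pvAllPatterns n).map (fun s => "1" ++ s)

-- expand_dont_care_pattern, structurally recursive over the characters; a '-' splits into the
-- '0' branch then the '1' branch, exactly the order of the Python recursion on the first '-'.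
def pvExpandDC : List Char → List (List Char)
  | [] => [[]]
  | c :: rest =>
    if c = '-' then (pvExpandDC rest).map (fun q => '0' :: q) ++ (pvExpandDC rest).map (fun q => '1' :: q)
    else (pvExpandDC rest).map (fun q => c :: q)

def expand_dont_care_pattern (pattern : String) : List String :=
  (pvExpandDC pattern.toList).map String.ofList

-- the explicit_outputs dict-building loop of A
def pvBuildOutputs (explicit_truth_table : List (String × String)) : PySem.Dict String String :=
  explicit_truth_table.foldl (fun d po =>
    if po.1.toList.contains '-' then   -- '-' in pattern (single-char substring = char membership)
      (expand_dont_care_pattern po.1).foldl (fun d c => d.insert c po.2) d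
    else d.insert po.1 po.2) PySem.Dict.empty

def create_complete_truth_table (explicit_truth_table : List (String × String)) (num_inputs : Int) : List (String × String) :=
  let all_input_patterns := pvAllPatterns num_inputs.toNat
  let has_output_0 := explicit_truth_table.any (fun e => e.2 == "0")
  let has_output_1 := explicit_truth_table.any (fun e => e.2 == "1")
  if has_output_0 && has_output_1 then []   -- Python raises ValueError here; outside Pre_
  else
    let default_output := if has_output_0 then "1" else "0"
    let explicit_outputs := pvBuildOutputs explicit_truth_table
    all_input_patterns.map (fun p => (p, explicit_outputs.getD p default_output))

-- ===== PORT B =====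

-- len(e) == len(p) and all(a == '-' or a == b for a, b in zip(e, p))
def pvCovers (e p : List Char) : Bool :=
  e.length == p.length && (e.zip p).all (fun ab => ab.1 == '-' || ab.1 == ab.2)

-- output_for: scan the reversed entries, first cover wins, else the default
def pvOutputFor (entries : List (String × String)) (dflt : String) (p : String) : String :=
  match entries with
  | [] => dflt
  | (ep, o) :: rest => if pvCovers ep.toList p.toList then o else pvOutputFor rest dflt p

-- rows(prefix, k)
def pvRowsB (entries : List (String × String)) (dflt : String) (pre : String) : Nat → List (String × String)
  | 0 => [(pre, pvOutputFor entries dflt pre)]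
  | k + 1 => pvRowsB entries dflt (pre ++ "0") k ++ pvRowsB entries dflt (pre ++ "1") k

def create_complete_truth_table_alt (explicit_truth_table : List (String × String)) (num_inputs : Int) : List (String × String) :=
  let has_output_0 := explicit_truth_table.any (fun e => e.2 == "0")
  let has_output_1 := explicit_truth_table.any (fun e => e.2 == "1")
  if has_output_0 && has_output_1 then []   -- Python raises ValueError here; outside Pre_
  else
    let default_output := if has_output_0 then "1" else "0"
    pvRowsB explicit_truth_table.reverse default_output "" num_inputs.toNat

-- ===== PRECONDITION & SPEC =====
-- Pre_ excludes exactly the inputs where A raises: a negative num_inputs (itertools.product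
-- rejects a negative repeat) and tables carrying both a '0'- and a '1'-output entry (explicit ValueError).
def Pre_create_complete_truth_table (explicit_truth_table : List (String × String)) (num_inputs : Int) : Prop :=
  0 ≤ num_inputs ∧
  ¬ (explicit_truth_table.any (fun e => e.2 == "0") = true ∧ explicit_truth_table.any (fun e => e.2 == "1") = true)

instance (explicit_truth_table : List (String × String)) (num_inputs : Int) : Decidable (Pre_create_complete_truth_table explicit_truth_table num_inputs) := by
  unfold Pre_create_complete_truth_table; infer_instance

def pvWitness_create_complete_truth_table : (List (String × String)) × Int := ([("0-", "1"), ("11", "1")], 2)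

def Spec_create_complete_truth_table (explicit_truth_table : List (String × String)) (num_inputs : Int) (out : List (String × String)) : Prop := out = create_complete_truth_table_alt explicit_truth_table num_inputs
instance (explicit_truth_table : List (String × String)) (num_inputs : Int) (out : List (String × String)) : Decidable (Spec_create_complete_truth_table explicit_truth_table num_inputs out) := by unfold Spec_create_complete_truth_table; infer_instance

-- ===== CLAIM (what is proved, stated in full; the proofs are below) =====
def Claim_equal_create_complete_truth_table : Prop := ∀ (explicit_truth_table : List (String × String)) (num_inputs : Int), Dom_create_complete_truth_table explicit_truth_table num_inputs → Pre_create_complete_truth_table explicit_truth_table num_inputs → Spec_create_complete_truth_table explicit_truth_table num_inputs (create_complete_truth_table explicit_truth_table num_inputs)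

-- ===== LEMMAS AND PROOFS =====

-- a pattern is binary if every character is '0' or '1'
def pvBinary (p : List Char) : Prop := ∀ c ∈ p, c = '0' ∨ c = '1'

lemma pvAllPatterns_binary : ∀ k : Nat, ∀ p ∈ pvAllPatterns k, pvBinary p.toList := by
  intro k
  induction k with
  | zero => intro p hp; simp [pvAllPatterns] at hp; subst hp; intro c hc; simp at hc
  | succ n ih =>
    intro p hp
    simp only [pvAllPatterns, List.mem_append, List.mem_map] at hp
    rcases hp with ⟨q, hq, rfl⟩ | ⟨q, hq, rfl⟩ <;>
    · intro c hc
      simp [String.toList_append] at hc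
      rcases hc with h | h
      · simp [h]
      · exact ih q hq c h

lemma pvExpandDC_dash (rest : List Char) :
    pvExpandDC ('-' :: rest) = (pvExpandDC rest).map (fun q => '0' :: q) ++ (pvExpandDC rest).map (fun q => '1' :: q) := by
  simp [pvExpandDC]

lemma pvExpandDC_nodash {a : Char} (rest : List Char) (ha : a ≠ '-') :
    pvExpandDC (a :: rest) = (pvExpandDC rest).map (fun q => a :: q) := by
  simp [pvExpandDC, ha]

lemma pvCovers_cons (a : Char) (e : List Char) (b : Char) (p : List Char) :
    pvCovers (a :: e) (b :: p) = ((a == '-' || a == b) && pvCovers e p) := by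
  simp [pvCovers, List.zip_cons_cons, Bool.and_left_comm]

lemma pvCovers_cons_nil (a : Char) (e : List Char) : pvCovers (a :: e) [] = false := by
  simp [pvCovers]

-- membership in the expansion = wildcard cover, for binary candidates
lemma mem_expandDC_iff_covers : ∀ (e p : List Char), pvBinary p →
    (p ∈ pvExpandDC e ↔ pvCovers e p = true) := by
  intro e
  induction e with
  | nil =>
    intro p _
    cases p <;> simp [pvExpandDC, pvCovers]
  | cons a rest ih =>
    intro p hp
    by_cases ha : a = '-'
    · subst ha
      cases p with
      | nil => simp [pvExpandDC_dash, pvCovers_cons_nil]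
      | cons b q =>
        have hb : b = '0' ∨ b = '1' := hp b (by simp)
        have hq : pvBinary q := fun c hc => hp c (by simp [hc])
        rw [pvExpandDC_dash, pvCovers_cons]
        simp only [List.mem_append, List.mem_map]
        constructor
        · rintro (⟨r, hr, heq⟩ | ⟨r, hr, heq⟩) <;>
          · cases heq
            simp [(ih q hq).mp hr]
        · intro h
          simp only [Bool.and_eq_true, Bool.or_eq_true, beq_iff_eq] at h
          have hqmem := (ih q hq).mpr h.2
          rcases hb with rfl | rfl
          · exact Or.inl ⟨q, hqmem, rfl⟩
          · exact Or.inr ⟨q, hqmem, rfl⟩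
    · cases p with
      | nil => simp [pvExpandDC_nodash rest ha, pvCovers_cons_nil]
      | cons b q =>
        have hq : pvBinary q := fun c hc => hp c (by simp [hc])
        rw [pvExpandDC_nodash rest ha, pvCovers_cons]
        simp only [List.mem_map]
        constructor
        · rintro ⟨r, hr, heq⟩
          cases heq
          simp [(ih q hq).mp hr]
        · intro h
          simp only [Bool.and_eq_true, Bool.or_eq_true, beq_iff_eq] at h
          rcases h.1 with h1 | h1
          · exact absurd h1 ha
          · exact ⟨q, (ih q hq).mpr h.2, by rw [h1]⟩

-- a dash-free entry covers exactly itself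
lemma covers_of_no_dash : ∀ (e p : List Char), ¬ e.contains '-' →
    (pvCovers e p = true ↔ e = p) := by
  intro e
  induction e with
  | nil =>
    intro p _
    cases p <;> simp [pvCovers]
  | cons a rest ih =>
    intro p hnd
    have ha : a ≠ '-' := by simp at hnd; exact fun h => hnd.1 h.symm
    have hr : ¬ rest.contains '-' := by simp at hnd ⊢; exact hnd.2
    cases p with
    | nil => simp [pvCovers_cons_nil]
    | cons b q =>
      simp only [pvCovers_cons, Bool.and_eq_true, Bool.or_eq_true, beq_iff_eq, List.cons.injEq]
      constructor
      · rintro ⟨h1 | h1, h2⟩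
        · exact absurd h1 ha
        · exact ⟨h1, (ih q hr).mp h2⟩
      · rintro ⟨rfl, rfl⟩
        exact ⟨Or.inr rfl, (ih rest hr).mpr rfl⟩

-- folding inserts of one value over a list of keys
lemma get?_foldl_insert (L : List String) (out : String) :
    ∀ (d : PySem.Dict String String) (p : String),
    (L.foldl (fun d c => d.insert c out) d).get? p = if p ∈ L then some out else d.get? p := by
  induction L with
  | nil => intro d p; simp
  | cons c L' ih =>
    intro d p
    simp only [List.foldl_cons, ih, List.mem_cons]
    by_cases h1 : p ∈ L'
    · simp [h1]
    · by_cases h2 : p = c <;> simp [h1, h2, PySem.Dict.get?_insert]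

-- B's scan, as an Option (first covering entry)
def pvScan? (entries : List (String × String)) (p : String) : Option String :=
  match entries with
  | [] => none
  | (ep, o) :: rest => if pvCovers ep.toList p.toList then some o else pvScan? rest p

lemma pvScan?_append (l1 l2 : List (String × String)) (p : String) :
    pvScan? (l1 ++ l2) p = (pvScan? l1 p).or (pvScan? l2 p) := by
  induction l1 with
  | nil => simp [pvScan?]
  | cons e l ih =>
    obtain ⟨ep, o⟩ := e
    by_cases h : pvCovers ep.toList p.toList <;> simp [pvScan?, h, ih]

lemma pvOutputFor_eq_scan (entries : List (String × String)) (dflt p : String) :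
    pvOutputFor entries dflt p = (pvScan? entries p).getD dflt := by
  induction entries with
  | nil => simp [pvOutputFor, pvScan?]
  | cons e rest ih =>
    obtain ⟨ep, o⟩ := e
    by_cases h : pvCovers ep.toList p.toList <;> simp [pvOutputFor, pvScan?, h, ih]

-- one dict-building step = one cover test, for binary p
lemma get?_step (d : PySem.Dict String String) (ep o : String) (p : String) (hp : pvBinary p.toList) :
    ((if ep.toList.contains '-' then
        (expand_dont_care_pattern ep).foldl (fun d c => d.insert c o) d
      else d.insert ep o).get? p) =
    if pvCovers ep.toList p.toList then some o else d.get? p := by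
  by_cases hd : ep.toList.contains '-'
  · rw [if_pos hd]
    rw [expand_dont_care_pattern, get?_foldl_insert]
    have hmem : p ∈ (pvExpandDC ep.toList).map String.ofList ↔ pvCovers ep.toList p.toList = true := by
      rw [List.mem_map]
      constructor
      · rintro ⟨q, hq, rfl⟩
        exact (mem_expandDC_iff_covers ep.toList (String.ofList q).toList (by simpa using hp)).mp
          (by simpa using hq)
      · intro h
        exact ⟨p.toList, (mem_expandDC_iff_covers ep.toList p.toList hp).mpr h, by simp⟩
    by_cases hc : pvCovers ep.toList p.toList
    · simp [hc, hmem.mpr hc]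
    · have : p ∉ (pvExpandDC ep.toList).map String.ofList := fun hm => hc (hmem.mp hm)
      simp [hc, this]
  · rw [if_neg hd]
    rw [PySem.Dict.get?_insert]
    by_cases hc : pvCovers ep.toList p.toList
    · have hl : ep.toList = p.toList := (covers_of_no_dash ep.toList p.toList (by simpa using hd)).mp hc
      have heq : p = ep := by
        have h2 := congrArg String.ofList hl
        simpa using h2.symm
      subst heq
      simp [hc]
    · have : p ≠ ep := by
        rintro rfl
        exact hc ((covers_of_no_dash p.toList p.toList (by simpa using hd)).mpr rfl)
      simp [hc, this]

-- the whole dict = the reversed scan, for binary p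
lemma get?_build (p : String) (hp : pvBinary p.toList) :
    ∀ (ett : List (String × String)) (d : PySem.Dict String String),
    (ett.foldl (fun d po =>
      if po.1.toList.contains '-' then
        (expand_dont_care_pattern po.1).foldl (fun d c => d.insert c po.2) d
      else d.insert po.1 po.2) d).get? p = (pvScan? ett.reverse p).or (d.get? p) := by
  intro ett
  induction ett with
  | nil => intro d; simp [pvScan?]
  | cons e rest ih =>
    intro d
    obtain ⟨ep, o⟩ := e
    simp only [List.foldl_cons, ih, List.reverse_cons, pvScan?_append]
    have hstep := get?_step d ep o p hp
    by_cases hc : pvCovers ep.toList p.toList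
    · simp only [hc, if_pos] at hstep
      rw [hstep]
      cases pvScan? rest.reverse p <;> simp [pvScan?, hc]
    · simp only [hc] at hstep
      rw [hstep]
      cases pvScan? rest.reverse p <;> simp [pvScan?, hc]

lemma dict_getD_eq_outputFor (ett : List (String × String)) (dflt p : String) (hp : pvBinary p.toList) :
    (pvBuildOutputs ett).getD p dflt = pvOutputFor ett.reverse dflt p := by
  have h1 : (pvBuildOutputs ett).getD p dflt = ((pvBuildOutputs ett).get? p).getD dflt := by
    simp [PySem.Dict.getD, PySem.Dict.get?]
  rw [h1, pvBuildOutputs, get?_build p hp ett PySem.Dict.empty, pvOutputFor_eq_scan]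
  cases pvScan? ett.reverse p <;> simp

-- rows = map over the pattern list
lemma pvRowsB_eq_map (entries : List (String × String)) (dflt : String) :
    ∀ (k : Nat) (pre : String),
    pvRowsB entries dflt pre k =
      (pvAllPatterns k).map (fun s => (pre ++ s, pvOutputFor entries dflt (pre ++ s))) := by
  intro k
  induction k with
  | zero => intro pre; simp [pvRowsB, pvAllPatterns]
  | succ n ih =>
    intro pre
    simp only [pvRowsB, pvAllPatterns, List.map_append, List.map_map, ih]
    congr 1 <;>
    · apply List.map_congr_left
      intro s _
      simp [Function.comp, String.append_assoc]

-- ===== VERDICT (by name: the statement is the Claim_ definition above) =====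
theorem create_complete_truth_table_spec : Claim_equal_create_complete_truth_table := by
  intro ett n _ hpre
  unfold Spec_create_complete_truth_table
  obtain ⟨hn, hboth⟩ := hpre
  unfold create_complete_truth_table create_complete_truth_table_alt
  by_cases h0 : ett.any (fun e => e.2 == "0") = true
  · by_cases h1 : ett.any (fun e => e.2 == "1") = true
    · exact absurd ⟨h0, h1⟩ hboth
    · simp only [h0, h1, Bool.and_false, Bool.false_eq_true, if_false, if_pos]
      rw [pvRowsB_eq_map]
      apply List.map_congr_left
      intro p hp
      simp only [String.empty_append]
      rw [dict_getD_eq_outputFor ett _ p (pvAllPatterns_binary n.toNat p hp)]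
  · simp only [h0, Bool.false_and, Bool.false_eq_true, if_false]
    rw [pvRowsB_eq_map]
    apply List.map_congr_left
    intro p hp
    simp only [String.empty_append]
    rw [dict_getD_eq_outputFor ett _ p (pvAllPatterns_binary n.toNat p hp)]
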